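-- pv_equiv track=rewrite | github.com/Cortantse/Lumina | backend/app/memory/text_splitter.py | _split_text_with_separators
-- ===== SOURCE A (Python) =====
-- from typing import List, Optional, Sequence, Any
--
-- def _split_text_with_separators(
--     text: str, separators: List[str], chunk_size: int
-- ) -> List[str]:
--     """Recursively splits text using a list of separators."""
--     final_splits = []
--     # Get the best separator to use
--     separator = None
--     for s in separators:
--         if s == "":  # Final fallback separator
--             separator = s
--             break
--         if s in text:
--             separator = s
--             break
--
--     # If no separator is found, the text is one big chunk
--     if separator is None:
--         return [text]
--
--     # If the separator is an empty string, we have to split by characters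
--     if separator == "":
--         return list(text)
--
--     # Split by the separator
--     splits = text.split(separator)
--
--     # Recursively split any parts that are still too large
--     remaining_separators = separators[separators.index(separator) + 1 :]
--     for part in splits:
--         if len(part) > chunk_size:
--             final_splits.extend(
--                 _split_text_with_separators(part, remaining_separators, chunk_size)
--             )
--         else:
--             final_splits.append(part)
--     return final_splits
-- ===== SOURCE B (Python) =====
-- def _expand(item, s, chunk_size):
--     done, frag = item
--     if done:
--         return [item]
--     if s == "":
--         return [(True, ch) for ch in frag]
--     if s in frag:
--         return [(len(part) <= chunk_size, part) for part in frag.split(s)]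
--     return [item]
--
--
-- def _split_text_with_separators(text, separators, chunk_size):
--     # Level-wise worklist: walk the separator list once, expanding every
--     # still-pending fragment at each level; no recursion, no index/slice.
--     items = [(False, text)]
--     for s in separators:
--         if all(done for done, _ in items):
--             break
--         items = [out for item in items for out in _expand(item, s, chunk_size)]
--     return [frag for _, frag in items]
-- ===== Notes on version B (the rewrite author's own statement) =====
-- stated objective: alternative
-- what changed: Replaced A's recursion (find best separator, split, recurse on oversized parts with the sliced separator tail, using list.index) with a non-recursive level-wise worklist: one pass over the separator list, expanding every still-pending fragment in a flat done/pending item list, stopping early once no fragment is pending.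
import Mathlib
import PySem

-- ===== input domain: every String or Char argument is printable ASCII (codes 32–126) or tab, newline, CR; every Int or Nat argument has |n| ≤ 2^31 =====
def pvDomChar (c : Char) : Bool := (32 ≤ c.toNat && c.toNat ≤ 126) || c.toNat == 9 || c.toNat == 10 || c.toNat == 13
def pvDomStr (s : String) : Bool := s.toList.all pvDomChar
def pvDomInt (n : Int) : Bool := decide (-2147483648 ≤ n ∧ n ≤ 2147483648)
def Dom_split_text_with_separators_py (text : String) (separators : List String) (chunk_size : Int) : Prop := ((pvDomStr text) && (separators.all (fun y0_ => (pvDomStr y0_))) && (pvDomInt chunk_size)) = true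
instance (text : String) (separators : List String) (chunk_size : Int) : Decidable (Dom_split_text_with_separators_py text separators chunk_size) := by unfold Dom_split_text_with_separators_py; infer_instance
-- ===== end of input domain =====

-- B replaces A's recursion with a single non-recursive pass over the separator
-- list that expands a flat worklist of done/pending fragments ("alternative").

-- ===== PORT A =====
-- the 'for s in separators: …' best-separator loop of A
def pvFindSep (text : String) : List String → Option String
  | [] => none
  | s :: rest =>
    if s = "" then some s
    else if PySem.Str.isIn s text then some s
    else pvFindSep text rest

theorem pvFindSep_mem (text : String) (seps : List String) (sep : String)
    (h : pvFindSep text seps = some sep) : sep ∈ seps := by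
  induction seps with
  | nil => simp [pvFindSep] at h
  | cons s rest ih =>
    simp only [pvFindSep] at h
    split_ifs at h with h1 h2
    · simp_all
    · simp_all
    · exact List.mem_cons_of_mem _ (ih h)

theorem pvRemaining_lt (separators : List String) (sep : String) (h : sep ∈ separators) :
    (PySem.List.slice separators (some ((((PySem.List.index? separators sep).getD 0) + 1 : Nat) : Int)) none).length
      < separators.length := by
  have hs : (PySem.List.index? separators sep).isSome := by
    simpa [PySem.List.index?_isSome_iff] using h
  obtain ⟨k, hk⟩ := Option.isSome_iff_exists.1 hs
  obtain ⟨hklt, -, -⟩ := PySem.List.getElem_of_index?_eq_some hk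
  rw [hk, PySem.List.slice_from_natCast]
  simp only [Option.getD_some, List.length_drop]
  omega

def split_text_with_separators_py (text : String) (separators : List String) (chunk_size : Int) : List String :=
  match hfs : pvFindSep text separators with
  | none => [text]
  | some sep =>
    if hsep : sep = "" then
      text.toList.map (fun c => String.ofList [c])
    else
      let splits := (PySem.Str.split? text sep).getD []
      let remaining := PySem.List.slice separators
        (some ((((PySem.List.index? separators sep).getD 0) + 1 : Nat) : Int)) none
      splits.foldl
        (fun acc part =>
          if chunk_size < PySem.Str.len part then
            acc ++ split_text_with_separators_py part remaining chunk_size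
          else
            acc ++ [part]) []
termination_by separators.length
decreasing_by
  exact pvRemaining_lt separators sep (pvFindSep_mem text separators sep hfs)

-- ===== PORT B =====
-- one worklist item is (done, fragment); _expand from Source B
def pvExpand (chunk_size : Int) (s : String) (item : Bool × String) : List (Bool × String) :=
  if item.1 then [item]
  else if s = "" then item.2.toList.map (fun c => (true, String.ofList [c]))
  else if PySem.Str.isIn s item.2 then
    ((PySem.Str.split? item.2 s).getD []).map
      (fun part => (decide (PySem.Str.len part ≤ chunk_size), part))
  else [item]

-- the 'for s in separators: if all done: break; items = …' loop of Source B
def pvLevelsBreak (chunk_size : Int) : List String → List (Bool × String) → List (Bool × String)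
  | [], items => items
  | s :: rest, items =>
    if items.all (fun it => it.1) then items
    else pvLevelsBreak chunk_size rest (items.flatMap (pvExpand chunk_size s))

def split_text_with_separators_py_alt (text : String) (separators : List String) (chunk_size : Int) : List String :=
  (pvLevelsBreak chunk_size separators [(false, text)]).map Prod.snd

-- ===== PRECONDITION & SPEC =====
def Spec_split_text_with_separators_py (text : String) (separators : List String) (chunk_size : Int) (out : List String) : Prop := out = split_text_with_separators_py_alt text separators chunk_size
instance (text : String) (separators : List String) (chunk_size : Int) (out : List String) : Decidable (Spec_split_text_with_separators_py text separators chunk_size out) := by unfold Spec_split_text_with_separators_py; infer_instance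

-- ===== CLAIM (what is proved, stated in full; the proofs are below) =====
def Claim_equal_split_text_with_separators_py : Prop := ∀ (text : String) (separators : List String) (chunk_size : Int), Dom_split_text_with_separators_py text separators chunk_size → Spec_split_text_with_separators_py text separators chunk_size (split_text_with_separators_py text separators chunk_size)

-- ===== LEMMAS AND PROOFS =====

-- B's fold over the separators, as a function of the item list
def pvLevels (chunk_size : Int) (seps : List String) (items : List (Bool × String)) : List (Bool × String) :=
  seps.foldl (fun items s => items.flatMap (pvExpand chunk_size s)) items

theorem pvLevels_flatMap (chunk_size : Int) (seps : List String) (items : List (Bool × String)) :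
    pvLevels chunk_size seps items = items.flatMap (fun it => pvLevels chunk_size seps [it]) := by
  induction seps generalizing items with
  | nil => simp [pvLevels]
  | cons s rest ih =>
    simp only [pvLevels, List.foldl_cons] at *
    rw [ih (items.flatMap (pvExpand chunk_size s)), List.flatMap_assoc]
    congr 1
    funext it
    rw [show List.flatMap (pvExpand chunk_size s) [it] = pvExpand chunk_size s it by simp]
    exact (ih (pvExpand chunk_size s it)).symm

theorem pvLevels_done (chunk_size : Int) (seps : List String) (frag : String) :
    pvLevels chunk_size seps [(true, frag)] = [(true, frag)] := by
  induction seps with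
  | nil => simp [pvLevels]
  | cons s rest ih =>
    simp only [pvLevels, List.foldl_cons] at *
    simpa [pvExpand] using ih

theorem pvFindSep_cond (text : String) (seps : List String) (sep : String)
    (h : pvFindSep text seps = some sep) : sep = "" ∨ PySem.Str.isIn sep text = true := by
  induction seps with
  | nil => simp [pvFindSep] at h
  | cons s rest ih =>
    simp only [pvFindSep] at h
    split_ifs at h with h1 h2
    · left; cases h; exact h1
    · right; cases h; exact h2
    · exact ih h

theorem flatMap_expand_done (chunk_size : Int) (s : String) (items : List (Bool × String))
    (h : ∀ it ∈ items, it.1 = true) : items.flatMap (pvExpand chunk_size s) = items := by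
  induction items with
  | nil => simp
  | cons it its ih =>
    have h1 := h it (List.mem_cons_self)
    simp only [List.flatMap_cons, pvExpand, h1, if_true]
    rw [ih (fun x hx => h x (List.mem_cons_of_mem _ hx))]
    simp

theorem pvLevels_of_all_done (chunk_size : Int) (rest : List String) (items : List (Bool × String))
    (h : ∀ it ∈ items, it.1 = true) : pvLevels chunk_size rest items = items := by
  induction rest with
  | nil => rfl
  | cons s r ih =>
    simp only [pvLevels, List.foldl_cons]
    rw [flatMap_expand_done chunk_size s items h]
    exact ih

theorem A_none (text : String) (seps : List String) (chunk_size : Int)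
    (h : pvFindSep text seps = none) :
    split_text_with_separators_py text seps chunk_size = [text] := by
  rw [split_text_with_separators_py]
  split <;> simp_all

theorem A_empty (text : String) (seps : List String) (chunk_size : Int)
    (h : pvFindSep text seps = some "") :
    split_text_with_separators_py text seps chunk_size
      = text.toList.map (fun c => String.ofList [c]) := by
  rw [split_text_with_separators_py]
  split <;> simp_all

theorem A_sep (text : String) (seps : List String) (chunk_size : Int) (sep : String)
    (h : pvFindSep text seps = some sep) (hne : sep ≠ "") :
    split_text_with_separators_py text seps chunk_size
      = ((PySem.Str.split? text sep).getD []).foldl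
          (fun acc part =>
            if chunk_size < PySem.Str.len part then
              acc ++ split_text_with_separators_py part
                (PySem.List.slice seps
                  (some ((((PySem.List.index? seps sep).getD 0) + 1 : Nat) : Int)) none) chunk_size
            else
              acc ++ [part]) [] := by
  rw [split_text_with_separators_py]
  split
  · simp_all
  · rename_i sep' heq
    rw [h] at heq
    cases heq
    rw [dif_neg hne]

theorem foldl_if_append_eq_flatMap (p : String → Prop) [DecidablePred p]
    (f g : String → List String) (xs : List String) (init : List String) :
    xs.foldl (fun acc part => if p part then acc ++ f part else acc ++ g part) init
      = init ++ xs.flatMap (fun part => if p part then f part else g part) := by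
  induction xs generalizing init with
  | nil => simp
  | cons x xs ih =>
    simp only [List.foldl_cons, List.flatMap_cons, ih]
    split <;> simp

theorem pvLevelsBreak_eq (chunk_size : Int) (seps : List String) (items : List (Bool × String)) :
    pvLevelsBreak chunk_size seps items = pvLevels chunk_size seps items := by
  induction seps generalizing items with
  | nil => rfl
  | cons s rest ih =>
    simp only [pvLevelsBreak, pvLevels, List.foldl_cons]
    split
    · rename_i hall
      have hd : ∀ it ∈ items, it.1 = true := fun it hit => by
        simpa using List.all_eq_true.1 hall it hit
      rw [flatMap_expand_done chunk_size s items hd]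
      exact (pvLevels_of_all_done chunk_size rest items hd).symm
    · exact ih (items.flatMap (pvExpand chunk_size s))

theorem pv_main (chunk_size : Int) (seps : List String) :
    ∀ text, (pvLevels chunk_size seps [(false, text)]).map Prod.snd
      = split_text_with_separators_py text seps chunk_size := by
  induction seps with
  | nil =>
    intro text
    rw [A_none text [] chunk_size rfl]
    rfl
  | cons s rest ih =>
    intro text
    have hstep : pvLevels chunk_size (s :: rest) [(false, text)]
        = pvLevels chunk_size rest (pvExpand chunk_size s (false, text)) := by
      simp [pvLevels]
    by_cases hs : s = ""
    · -- head separator is "": A returns the characters, B marks them all done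
      subst hs
      rw [A_empty text ("" :: rest) chunk_size (by simp [pvFindSep])]
      rw [hstep]
      have hexp : pvExpand chunk_size "" (false, text)
          = text.toList.map (fun c => (true, String.ofList [c])) := by
        unfold pvExpand
        rw [if_neg (by exact Bool.false_ne_true), if_pos rfl]
      rw [hexp]
      rw [pvLevels_of_all_done chunk_size rest _ (by intro it hit; simp at hit; obtain ⟨c, -, h⟩ := hit; simp [← h])]
      simp
    · by_cases hin : PySem.Str.isIn s text = true
      · -- head separator matches: both split by s and continue with rest
        have hfs : pvFindSep text (s :: rest) = some s := by
          unfold pvFindSep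
          rw [if_neg hs, if_pos hin]
        have hidx : (PySem.List.index? (s :: rest) s).getD 0 = 0 := by
          rw [PySem.List.index?_cons_self]; rfl
        have hrem : PySem.List.slice (s :: rest)
            (some (((((PySem.List.index? (s :: rest) s).getD 0) + 1 : Nat)) : Int)) none = rest := by
          rw [hidx, PySem.List.slice_from_natCast]
          rfl
        rw [A_sep text (s :: rest) chunk_size s hfs hs, hrem]
        rw [hstep]
        have hexp : pvExpand chunk_size s (false, text)
            = ((PySem.Str.split? text s).getD []).map
                (fun part => (decide (PySem.Str.len part ≤ chunk_size), part)) := by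
          unfold pvExpand
          rw [if_neg (by exact Bool.false_ne_true), if_neg hs, if_pos hin]
        rw [hexp, pvLevels_flatMap]
        rw [foldl_if_append_eq_flatMap (fun part => chunk_size < PySem.Str.len part)]
        simp only [List.nil_append, List.flatMap_map, List.map_flatMap]
        refine List.flatMap_congr (fun part _ => ?_)
        by_cases hlen : chunk_size < PySem.Str.len part
        · have : decide (PySem.Str.len part ≤ chunk_size) = false :=
            decide_eq_false (not_le.mpr hlen)
          rw [this, if_pos hlen]
          exact ih part
        · have : decide (PySem.Str.len part ≤ chunk_size) = true :=
            decide_eq_true (not_lt.mp hlen)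
          rw [this, if_neg hlen, pvLevels_done]
          rfl
      · -- head separator absent: both skip it
        have hB : pvLevels chunk_size (s :: rest) [(false, text)]
            = pvLevels chunk_size rest [(false, text)] := by
          rw [hstep]
          have : pvExpand chunk_size s (false, text) = [(false, text)] := by
            unfold pvExpand
            rw [if_neg (by exact Bool.false_ne_true), if_neg hs, if_neg hin]
          rw [this]
        have hfs : pvFindSep text (s :: rest) = pvFindSep text rest := by
          show (if s = "" then some s
            else if PySem.Str.isIn s text then some s else pvFindSep text rest) = _
          rw [if_neg hs, if_neg hin]
        rw [hB, ih text]
        -- A on (s :: rest) equals A on rest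
        cases hrest : pvFindSep text rest with
        | none =>
          rw [A_none text rest chunk_size hrest, A_none text (s :: rest) chunk_size (hfs.trans hrest)]
        | some sep =>
          by_cases hsep : sep = ""
          · subst hsep
            rw [A_empty text rest chunk_size hrest,
              A_empty text (s :: rest) chunk_size (hfs.trans hrest)]
          · have hcond := pvFindSep_cond text rest sep hrest
            have hns : s ≠ sep := by
              intro hssep
              subst hssep
              rcases hcond with h1 | h1
              · exact hs h1
              · exact hin h1
            have hmem : sep ∈ rest := pvFindSep_mem text rest sep hrest
            have hsome : (PySem.List.index? rest sep).isSome := by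
              simpa [PySem.List.index?_isSome_iff] using hmem
            obtain ⟨k, hk⟩ := Option.isSome_iff_exists.1 hsome
            have hidx : PySem.List.index? (s :: rest) sep = some (k + 1) := by
              rw [PySem.List.index?_cons_of_ne rest hns, hk]
              rfl
            have hrem : PySem.List.slice (s :: rest)
                (some (((((PySem.List.index? (s :: rest) sep).getD 0) + 1 : Nat)) : Int)) none
                = PySem.List.slice rest
                  (some (((((PySem.List.index? rest sep).getD 0) + 1 : Nat)) : Int)) none := by
              rw [hidx, hk, PySem.List.slice_from_natCast, PySem.List.slice_from_natCast]
              rfl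
            rw [A_sep text rest chunk_size sep hrest hsep,
              A_sep text (s :: rest) chunk_size sep (hfs.trans hrest) hsep, hrem]

-- ===== VERDICT (by name: the statement is the Claim_ definition above) =====
theorem split_text_with_separators_py_spec : Claim_equal_split_text_with_separators_py := by
  intro text separators chunk_size _
  unfold Spec_split_text_with_separators_py split_text_with_separators_py_alt
  rw [pvLevelsBreak_eq]
  exact (pv_main chunk_size separators text).symm
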